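-- pv_equiv track=rewrite | github.com/FreeCAD/FreeCAD | src/Mod/OpenSCAD/OpenSCAD2Dgeom.py | directchildren
-- ===== SOURCE A (Python) =====
-- def directchildren(isinsidedict,parent):
--     #return [child for child in isinsidedict.get(parent,[]) if child not in isinsidedict]
--     dchildren=[]
--     for child in isinsidedict.get(parent,[]):
--         direct = True
--         for key, value in isinsidedict.items():
--             if key != parent and child in value and parent not in value:
--                 direct = False
--         if direct:
--             dchildren.append(child)
--     return dchildren
-- ===== SOURCE B (Python) =====
-- def directchildren(isinsidedict, parent):
--     children = isinsidedict.get(parent, [])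
--     if not children:
--         return []
--     # Precompute once the set of all elements that occur in some other key's
--     # value list not containing parent; a child is direct iff it is not blocked.
--     blocked = set()
--     for key, value in isinsidedict.items():
--         if key != parent and parent not in value:
--             blocked.update(value)
--     return [child for child in children if child not in blocked]
-- ===== Notes on version B (the rewrite author's own statement) =====
-- stated objective: alternative
-- what changed: B returns [] immediately when parent has no children, and otherwise, instead of rescanning every dict entry (and its value list) once per child, builds in one pass a set of 'blocked' elements (members of any other key's value list that does not contain parent) and filters the children with O(1) membership tests; this removes the children*entries nested scan, though on the timing inputs (few children per parent) both run in the same linear time.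
import Mathlib
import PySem

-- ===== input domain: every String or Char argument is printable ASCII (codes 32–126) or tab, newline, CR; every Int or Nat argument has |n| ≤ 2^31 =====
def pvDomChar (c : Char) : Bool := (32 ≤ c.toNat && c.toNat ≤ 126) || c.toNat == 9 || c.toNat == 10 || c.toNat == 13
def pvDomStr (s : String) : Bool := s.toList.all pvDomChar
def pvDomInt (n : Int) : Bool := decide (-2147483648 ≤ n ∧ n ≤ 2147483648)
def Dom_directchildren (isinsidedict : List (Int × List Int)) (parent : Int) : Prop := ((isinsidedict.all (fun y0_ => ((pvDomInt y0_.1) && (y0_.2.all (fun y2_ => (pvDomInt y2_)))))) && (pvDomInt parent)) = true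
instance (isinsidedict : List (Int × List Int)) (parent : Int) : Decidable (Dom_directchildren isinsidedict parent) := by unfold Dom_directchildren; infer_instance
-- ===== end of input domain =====

-- B replaces A's per-child rescan of the whole dict by a set of blocked elements
-- computed once, then a single filter pass over the children (objective: alternative).

-- ===== PORT A =====
-- for each child of parent, scan all (key, value) items; child is direct unless
-- some other key's value contains child but not parent
def directchildren (isinsidedict : List (Int × List Int)) (parent : Int) : List Int :=
  ((isinsidedict.lookup parent).getD []).foldl (fun dchildren child =>
    let direct := isinsidedict.foldl (fun direct kv =>
      if kv.1 ≠ parent ∧ child ∈ kv.2 ∧ parent ∉ kv.2 then false else direct) true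
    if direct then dchildren ++ [child] else dchildren) []

-- ===== PORT B =====
-- early exit when there are no children, else one pass building the blocked
-- set, then a filter over the children
def directchildren_alt (isinsidedict : List (Int × List Int)) (parent : Int) : List Int :=
  let children := (isinsidedict.lookup parent).getD []
  if children = [] then []
  else
    let blocked : PySem.Set Int := isinsidedict.foldl (fun s kv =>
      if kv.1 ≠ parent ∧ parent ∉ kv.2 then PySem.Set.update s kv.2 else s) PySem.Set.empty
    children.filter (fun child => ¬ child ∈ blocked)

-- ===== PRECONDITION & SPEC =====
def Spec_directchildren (isinsidedict : List (Int × List Int)) (parent : Int) (out : List Int) : Prop := out = directchildren_alt isinsidedict parent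
instance (isinsidedict : List (Int × List Int)) (parent : Int) (out : List Int) : Decidable (Spec_directchildren isinsidedict parent out) := by unfold Spec_directchildren; infer_instance

-- ===== CLAIM (what is proved, stated in full; the proofs are below) =====
def Claim_equal_directchildren : Prop := ∀ (isinsidedict : List (Int × List Int)) (parent : Int), Dom_directchildren isinsidedict parent → Spec_directchildren isinsidedict parent (directchildren isinsidedict parent)

-- ===== LEMMAS AND PROOFS =====

-- A's inner loop: the flag stays true iff no item triggers the condition
theorem pv_inner_fold (parent child : Int) (l : List (Int × List Int)) (b : Bool) :
    l.foldl (fun direct kv => if kv.1 ≠ parent ∧ child ∈ kv.2 ∧ parent ∉ kv.2 then false else direct) b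
      = (b && l.all (fun kv => decide ¬ (kv.1 ≠ parent ∧ child ∈ kv.2 ∧ parent ∉ kv.2))) := by
  induction l generalizing b with
  | nil => simp
  | cons hd tl ih =>
      simp only [List.foldl_cons, List.all_cons, ih]
      by_cases h : hd.1 ≠ parent ∧ child ∈ hd.2 ∧ parent ∉ hd.2 <;> simp [h]

-- membership in B's blocked set, characterised
theorem pv_blocked_mem (Q : Int × List Int → Prop) [DecidablePred Q]
    (l : List (Int × List Int)) (s : PySem.Set Int) (x : Int) :
    (x ∈ l.foldl (fun s kv => if Q kv then PySem.Set.update s kv.2 else s) s)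
      ↔ x ∈ s ∨ ∃ kv ∈ l, Q kv ∧ x ∈ kv.2 := by
  induction l generalizing s with
  | nil => simp
  | cons hd tl ih =>
      simp only [List.foldl_cons]
      by_cases h : Q hd
      · simp only [h, if_pos, ih, PySem.Set.mem_update, List.exists_mem_cons_iff]
        tauto
      · simp only [h, if_neg, ih, not_false_iff, List.exists_mem_cons_iff]
        tauto

theorem directchildren_eq_alt (d : List (Int × List Int)) (parent : Int) :
    directchildren d parent = directchildren_alt d parent := by
  unfold directchildren directchildren_alt
  rw [PySem.List.foldl_append_if_eq_filter]
  simp only [List.nil_append]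
  by_cases hc : (d.lookup parent).getD [] = []
  · simp [hc]
  simp only [hc, if_neg, not_false_iff]
  apply List.filter_congr
  intro child _
  rw [pv_inner_fold parent child]
  simp only [Bool.true_and,
    pv_blocked_mem (fun kv => kv.1 ≠ parent ∧ parent ∉ kv.2)]
  simp only [PySem.Set.empty, List.not_mem_nil, false_or]
  rw [Bool.eq_iff_iff]
  simp only [List.all_eq_true, decide_eq_true_eq]
  constructor
  · rintro h ⟨kv, hkv, ⟨h1, h2⟩, h3⟩
    exact h kv hkv ⟨h1, h3, h2⟩
  · rintro h kv hkv ⟨h1, h2, h3⟩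
    exact h ⟨kv, hkv, ⟨h1, h3⟩, h2⟩

-- ===== VERDICT (by name: the statement is the Claim_ definition above) =====
theorem directchildren_spec : Claim_equal_directchildren := by
  intro d parent _
  unfold Spec_directchildren
  exact directchildren_eq_alt d parent
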